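-- pv_equiv track=rewrite | github.com/ViniciusLippel/8-Puzzle | solver.py | inv_count
-- ===== SOURCE A (Python) =====
-- def inv_count(arr):
--     #arr = list(chain.from_iterable(pos))
--     inv_count = 0
--     empty_value = 0
--     for i in range(0, 9):
--         for j in range(i + 1, 9):
--             if arr[j] != empty_value and arr[i] != empty_value and arr[i] > arr[j]:
--                 inv_count += 1
--     return inv_count
-- ===== SOURCE B (Python) =====
-- def inv_count(arr):
--     tiles = [arr[i] for i in range(9)]
--     vals = [v for v in tiles if v != 0]
--     _, n = _sort_count(vals)
--     return n
--
-- def _sort_count(xs):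
--     """Merge sort xs, returning (sorted list, number of strict inversions)."""
--     if len(xs) <= 1:
--         return xs, 0
--     mid = len(xs) // 2
--     left, a = _sort_count(xs[:mid])
--     right, b = _sort_count(xs[mid:])
--     merged, count, i, j = [], a + b, 0, 0
--     while i < len(left) and j < len(right):
--         if right[j] < left[i]:
--             count += len(left) - i
--             merged.append(right[j])
--             j += 1
--         else:
--             merged.append(left[i])
--             i += 1
--     merged.extend(left[i:])
--     merged.extend(right[j:])
--     return merged, count
-- ===== Notes on version B (the rewrite author's own statement) =====
-- stated objective: alternative
-- what changed: Replaces the fixed double loop over index pairs (36 comparisons) by filter-out-zeros plus a merge-sort that counts strict inversions during the merge.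
import Mathlib
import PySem

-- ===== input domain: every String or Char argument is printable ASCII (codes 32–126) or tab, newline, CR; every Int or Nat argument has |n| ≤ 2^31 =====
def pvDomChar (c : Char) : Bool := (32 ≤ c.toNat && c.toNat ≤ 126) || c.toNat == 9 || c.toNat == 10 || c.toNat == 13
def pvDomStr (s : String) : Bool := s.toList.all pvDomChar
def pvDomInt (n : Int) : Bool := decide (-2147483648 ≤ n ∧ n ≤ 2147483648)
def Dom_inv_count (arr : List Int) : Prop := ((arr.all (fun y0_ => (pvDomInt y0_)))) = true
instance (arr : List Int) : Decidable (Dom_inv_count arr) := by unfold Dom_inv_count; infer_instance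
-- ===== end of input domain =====

-- B replaces A's fixed double index loop by filter-out-zeros + a merge sort that counts inversions.

-- ===== PORT A =====
-- literal port of A's double loop over index pairs (i, j) with 0 ≤ i < j < 9
def inv_count (arr : List Int) : Int :=
  (PySem.List.pyRange 0 9 1).foldl (fun ic i =>
    (PySem.List.pyRange (i + 1) 9 1).foldl (fun ic j =>
      if PySem.List.pyGetD arr j 0 ≠ 0 ∧ PySem.List.pyGetD arr i 0 ≠ 0 ∧
          PySem.List.pyGetD arr i 0 > PySem.List.pyGetD arr j 0
      then ic + 1 else ic) ic) 0

-- ===== PORT B =====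
-- port of _sort_count's merge loop: two-pointer merge counting remaining-left elements
def pvMergeCount : List Int → List Int → List Int × Int
  | [], ys => (ys, 0)
  | xs, [] => (xs, 0)
  | x :: xs, y :: ys =>
    if y < x then
      let p := pvMergeCount (x :: xs) ys
      (y :: p.1, p.2 + ((xs.length : Int) + 1))
    else
      let p := pvMergeCount xs (y :: ys)
      (x :: p.1, p.2)
  termination_by xs ys => xs.length + ys.length
  decreasing_by all_goals (simp; try omega)

-- port of _sort_count: split at the middle, recurse, merge with count
def pvSortCount (xs : List Int) : List Int × Int :=
  if xs.length ≤ 1 then (xs, 0)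
  else
    let mid := xs.length / 2
    let L := pvSortCount (xs.take mid)
    let R := pvSortCount (xs.drop mid)
    let M := pvMergeCount L.1 R.1
    (M.1, L.2 + R.2 + M.2)
  termination_by xs.length
  decreasing_by all_goals simp [List.length_take, List.length_drop]; omega

def inv_count_alt (arr : List Int) : Int :=
  let tiles := (PySem.List.pyRange 0 9 1).map (fun i => PySem.List.pyGetD arr i 0)
  let vals := tiles.filter (fun v => decide (v ≠ 0))
  (pvSortCount vals).2

-- ===== PRECONDITION & SPEC =====
-- A raises IndexError (arr[i] / arr[j] for i, j up to 8) when arr has fewer than 9 elements.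
def Pre_inv_count (arr : List Int) : Prop := 9 ≤ arr.length
instance (arr : List Int) : Decidable (Pre_inv_count arr) := by unfold Pre_inv_count; infer_instance
def pvWitness_inv_count : List Int := [1, 2, 3, 4, 5, 6, 7, 8, 0]

def Spec_inv_count (arr : List Int) (out : Int) : Prop := out = inv_count_alt arr
instance (arr : List Int) (out : Int) : Decidable (Spec_inv_count arr out) := by unfold Spec_inv_count; infer_instance

-- ===== CLAIM (what is proved, stated in full; the proofs are below) =====
def Claim_equal_inv_count : Prop := ∀ (arr : List Int), Dom_inv_count arr → Pre_inv_count arr → Spec_inv_count arr (inv_count arr)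

-- ===== LEMMAS AND PROOFS =====

-- number of strict inversions of a list (pairs i < j with l[i] > l[j])
def invN : List Int → Nat
  | [] => 0
  | x :: xs => xs.countP (fun y => decide (y < x)) + invN xs

-- cross inversions: pairs (x ∈ L, y ∈ R) with y < x
def crossN (L R : List Int) : Nat := (R.map (fun y => L.countP (fun x => decide (y < x)))).sum

-- A's per-row count, structurally
def gN : List Int → Nat
  | [] => 0
  | x :: xs => xs.countP (fun y => decide (y ≠ 0 ∧ x ≠ 0 ∧ x > y)) + gN xs

theorem crossN_nil_right (L : List Int) : crossN L [] = 0 := rfl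

theorem crossN_nil_left (R : List Int) : crossN [] R = 0 := by
  simp [crossN]

theorem crossN_cons_right (L : List Int) (y : Int) (R : List Int) :
    crossN L (y :: R) = L.countP (fun x => decide (y < x)) + crossN L R := rfl

theorem crossN_cons_left (x : Int) (L R : List Int) :
    crossN (x :: L) R = R.countP (fun y => decide (y < x)) + crossN L R := by
  induction R with
  | nil => rfl
  | cons y R ih =>
    simp only [crossN_cons_right, ih, List.countP_cons]
    by_cases h : y < x <;> simp [h] <;> omega

theorem crossN_perm {L L' R R' : List Int} (hL : L.Perm L') (hR : R.Perm R') :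
    crossN L R = crossN L' R' := by
  unfold crossN
  rw [(hR.map (fun y => L.countP (fun x => decide (y < x)))).sum_eq]
  congr 1
  exact List.map_congr_left (fun y _ => hL.countP_eq _)

theorem invN_append (u v : List Int) : invN (u ++ v) = invN u + invN v + crossN u v := by
  induction u with
  | nil => simp [invN, crossN_nil_left]
  | cons x u ih =>
    simp only [List.cons_append, invN, List.countP_append, ih, crossN_cons_left]
    omega

theorem pvMergeCount_perm (L R : List Int) : (pvMergeCount L R).1.Perm (L ++ R) := by
  fun_induction pvMergeCount with
  | case1 ys => simp
  | case2 xs h => simp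
  | case3 x xs y ys hlt p ih =>
    exact (ih.cons y).trans List.perm_middle.symm
  | case4 x xs y ys hlt p ih =>
    exact ih.cons x

theorem pvMergeCount_sorted {L R : List Int} (hL : L.Pairwise (· ≤ ·)) (hR : R.Pairwise (· ≤ ·)) :
    (pvMergeCount L R).1.Pairwise (· ≤ ·) := by
  fun_induction pvMergeCount with
  | case1 ys => exact hR
  | case2 xs h => exact hL
  | case3 x xs y ys hlt p ih =>
    refine List.pairwise_cons.mpr ⟨?_, ih hL hR.of_cons⟩
    intro z hz
    rcases List.mem_append.mp ((pvMergeCount_perm (x :: xs) ys).mem_iff.mp hz) with hz | hz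
    · rcases List.mem_cons.mp hz with rfl | hz
      · exact le_of_lt hlt
      · exact le_of_lt (lt_of_lt_of_le hlt (List.rel_of_pairwise_cons hL hz))
    · exact List.rel_of_pairwise_cons hR hz
  | case4 x xs y ys hlt p ih =>
    refine List.pairwise_cons.mpr ⟨?_, ih hL.of_cons hR⟩
    intro z hz
    rcases List.mem_append.mp ((pvMergeCount_perm xs (y :: ys)).mem_iff.mp hz) with hz | hz
    · exact List.rel_of_pairwise_cons hL hz
    · rcases List.mem_cons.mp hz with rfl | hz
      · exact not_lt.mp hlt
      · exact le_trans (not_lt.mp hlt) (List.rel_of_pairwise_cons hR hz)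

theorem pvMergeCount_count {L R : List Int} (hL : L.Pairwise (· ≤ ·)) (hR : R.Pairwise (· ≤ ·)) :
    (pvMergeCount L R).2 = (crossN L R : Int) := by
  fun_induction pvMergeCount with
  | case1 ys => simp [crossN_nil_left]
  | case2 xs h => simp [crossN_nil_right]
  | case3 x xs y ys hlt p ih =>
    have hall : (x :: xs).countP (fun t => decide (y < t)) = (x :: xs).length := by
      refine List.countP_eq_length.mpr ?_
      intro t ht
      rcases List.mem_cons.mp ht with rfl | ht
      · simpa using hlt
      · simpa using lt_of_lt_of_le hlt (List.rel_of_pairwise_cons hL ht)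
    rw [crossN_cons_right, hall, ih hL hR.of_cons]
    push_cast [List.length_cons]
    ring
  | case4 x xs y ys hlt p ih =>
    have hzero : (y :: ys).countP (fun t => decide (t < x)) = 0 := by
      refine List.countP_eq_zero.mpr ?_
      intro t ht
      rcases List.mem_cons.mp ht with rfl | ht
      · simpa using hlt
      · simpa using not_lt.mpr (le_trans (not_lt.mp hlt) (List.rel_of_pairwise_cons hR ht))
    rw [crossN_cons_left, hzero, ih hL.of_cons hR]
    push_cast
    ring

theorem pvSortCount_spec (l : List Int) :
    (pvSortCount l).1.Perm l ∧ (pvSortCount l).1.Pairwise (· ≤ ·) ∧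
      (pvSortCount l).2 = (invN l : Int) := by
  fun_induction pvSortCount with
  | case1 xs h =>
    refine ⟨List.Perm.refl _, ?_, ?_⟩ <;>
      rcases xs with _ | ⟨a, _ | ⟨b, t⟩⟩ <;> simp [invN] at h ⊢
  | case2 xs h mid L R M ihL ihR =>
    obtain ⟨pL, sL, cL⟩ := ihL
    obtain ⟨pR, sR, cR⟩ := ihR
    have hperm : M.1.Perm (xs.take mid ++ xs.drop mid) :=
      (pvMergeCount_perm L.1 R.1).trans (pL.append pR)
    refine ⟨by simpa using hperm, pvMergeCount_sorted sL sR, ?_⟩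
    have hc : M.2 = (crossN L.1 R.1 : Int) := pvMergeCount_count sL sR
    rw [hc, crossN_perm pL pR, cL, cR]
    have : invN (xs.take mid ++ xs.drop mid) =
        invN (xs.take mid) + invN (xs.drop mid) + crossN (xs.take mid) (xs.drop mid) :=
      invN_append _ _
    rw [List.take_append_drop] at this
    rw [this]
    push_cast
    ring

theorem invN_filter (t : List Int) :
    invN (t.filter (fun v => decide (v ≠ 0))) = gN t := by
  induction t with
  | nil => rfl
  | cons x xs ih =>
    by_cases hx : x = 0
    · subst hx
      simpa [List.filter_cons, invN, gN] using ih
    · have hfc : List.filter (fun v => decide (v ≠ 0)) (x :: xs)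
          = x :: List.filter (fun v => decide (v ≠ 0)) xs := by
        simp [hx]
      rw [hfc]
      simp only [invN, gN]
      rw [ih, List.countP_filter]
      congr 1
      refine List.countP_congr ?_
      intro y _
      by_cases h1 : y = 0 <;> by_cases h2 : y < x <;> simp [hx, h1, h2, gt_iff_lt]

-- A's double loop over a list t of length 9 computes gN t
theorem sum_range_gN (t : List Int) :
    ((List.range t.length).map (fun k =>
      ((t.drop (k + 1)).countP (fun y => decide (y ≠ 0 ∧ t.getD k 0 ≠ 0 ∧ t.getD k 0 > y)) : Int))).sum
    = (gN t : Int) := by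
  induction t with
  | nil => simp [gN]
  | cons x xs ih =>
    rw [List.length_cons, List.range_succ_eq_map, List.map_cons, List.map_map, List.sum_cons]
    have hcomp : ((List.range xs.length).map ((fun k =>
        (((x :: xs).drop (k + 1)).countP
          (fun y => decide (y ≠ 0 ∧ (x :: xs).getD k 0 ≠ 0 ∧ (x :: xs).getD k 0 > y)) : Int)) ∘ Nat.succ))
        = ((List.range xs.length).map (fun k =>
        ((xs.drop (k + 1)).countP (fun y => decide (y ≠ 0 ∧ xs.getD k 0 ≠ 0 ∧ xs.getD k 0 > y)) : Int))) := by
      refine List.map_congr_left ?_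
      intro k _
      simp only [Function.comp_apply, List.drop_succ_cons, List.getD_cons_succ]
    rw [hcomp, ih]
    simp only [List.drop_succ_cons, List.drop_zero, List.getD_cons_zero, gN]
    push_cast
    ring

theorem inv_count_eq_gN (arr : List Int) (h : Pre_inv_count arr) :
    inv_count arr = (gN (arr.take 9) : Int) := by
  have hpre : (9 : Int) ≤ (arr.length : Int) := by exact_mod_cast h
  have ht : (arr.take 9).length = 9 := by
    simp only [List.length_take]
    omega
  have h9 : ((arr.take 9).length : Int) = 9 := by exact_mod_cast ht
  have hget : ∀ i : Int, 0 ≤ i → i < 9 →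
      PySem.List.pyGetD arr i 0 = PySem.List.pyGetD (arr.take 9) i 0 := by
    intro i h0 h9'
    rw [PySem.List.pyGetD_eq_getElem arr 0 h0 (by omega),
      PySem.List.pyGetD_eq_getElem (arr.take 9) 0 h0 (by omega),
      List.getElem_take]
  have e1 : inv_count arr =
      (PySem.List.pyRange 0 9 1).foldl (fun ic i =>
        (PySem.List.pyRange (i + 1) 9 1).foldl (fun ic j =>
          if PySem.List.pyGetD (arr.take 9) j 0 ≠ 0 ∧ PySem.List.pyGetD (arr.take 9) i 0 ≠ 0 ∧
              PySem.List.pyGetD (arr.take 9) i 0 > PySem.List.pyGetD (arr.take 9) j 0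
          then ic + 1 else ic) ic) 0 := by
    unfold inv_count
    refine PySem.List.foldl_congr_mem _ _ _ _ ?_
    intro ic i hi
    obtain ⟨hi0, hi9⟩ := PySem.List.mem_pyRange_one.mp hi
    rw [hget i hi0 hi9]
    refine PySem.List.foldl_congr_mem _ _ _ _ ?_
    intro ic' j hj
    obtain ⟨hj1, hj9⟩ := PySem.List.mem_pyRange_one.mp hj
    rw [hget j (by omega) hj9]
  rw [e1, ← h9]
  have e3 : (PySem.List.pyRange 0 ((arr.take 9).length : Int) 1).foldl (fun ic i =>
        (PySem.List.pyRange (i + 1) ((arr.take 9).length : Int) 1).foldl (fun ic j =>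
          if PySem.List.pyGetD (arr.take 9) j 0 ≠ 0 ∧ PySem.List.pyGetD (arr.take 9) i 0 ≠ 0 ∧
              PySem.List.pyGetD (arr.take 9) i 0 > PySem.List.pyGetD (arr.take 9) j 0
          then ic + 1 else ic) ic) 0
      = (PySem.List.pyRange 0 ((arr.take 9).length : Int) 1).foldl (fun ic i =>
          ic + (((arr.take 9).drop (i + 1).toNat).countP (fun y =>
            decide (y ≠ 0 ∧ PySem.List.pyGetD (arr.take 9) i 0 ≠ 0 ∧
              PySem.List.pyGetD (arr.take 9) i 0 > y)) : Int)) 0 := by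
    refine PySem.List.foldl_congr_mem _ _ _ _ ?_
    intro ic i hi
    obtain ⟨hi0, _⟩ := PySem.List.mem_pyRange_one.mp hi
    rw [PySem.List.foldl_pyRange_pyGetD' (arr.take 9) 0
      (fun acc y => if y ≠ 0 ∧ PySem.List.pyGetD (arr.take 9) i 0 ≠ 0 ∧
        PySem.List.pyGetD (arr.take 9) i 0 > y then acc + 1 else acc) ic (by omega)]
    exact PySem.List.foldl_ite_add_one _ _ _
  rw [e3, PySem.List.foldl_add, zero_add, PySem.List.pyRange_zero_natCast, List.map_map]
  rw [← sum_range_gN (arr.take 9)]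
  refine congrArg List.sum (List.map_congr_left ?_)
  intro k hk
  simp only [Function.comp_apply, PySem.List.pyGetD_natCast]
  have hk1 : ((k : Int) + 1).toNat = k + 1 := by omega
  rw [hk1]

theorem inv_count_alt_eq (arr : List Int) (h : Pre_inv_count arr) :
    inv_count_alt arr = (invN ((arr.take 9).filter (fun v => decide (v ≠ 0))) : Int) := by
  have hpre : (9 : Int) ≤ (arr.length : Int) := by exact_mod_cast h
  have ht : (arr.take 9).length = 9 := by
    simp only [List.length_take]
    omega
  have h9 : ((arr.take 9).length : Int) = 9 := by exact_mod_cast ht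
  have htiles : (PySem.List.pyRange 0 9 1).map (fun i => PySem.List.pyGetD arr i 0)
      = arr.take 9 := by
    have h1 : ∀ i ∈ PySem.List.pyRange 0 9 1,
        PySem.List.pyGetD arr i 0 = PySem.List.pyGetD (arr.take 9) i 0 := by
      intro i hi
      obtain ⟨hi0, hi9⟩ := PySem.List.mem_pyRange_one.mp hi
      rw [PySem.List.pyGetD_eq_getElem arr 0 hi0 (by omega),
        PySem.List.pyGetD_eq_getElem (arr.take 9) 0 hi0 (by omega),
        List.getElem_take]
    rw [List.map_congr_left h1, ← h9, PySem.List.map_pyGetD_pyRange_zero']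
  unfold inv_count_alt
  rw [htiles]
  exact (pvSortCount_spec _).2.2

-- ===== VERDICT (by name: the statement is the Claim_ definition above) =====
theorem inv_count_spec : Claim_equal_inv_count := by
  intro arr _ hpre
  unfold Spec_inv_count
  rw [inv_count_eq_gN arr hpre, inv_count_alt_eq arr hpre, invN_filter]
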